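-- pv_equiv track=rewrite | github.com/Fra5099/CS1_Python | hw4/double_add_5.py | find_start_itr
-- ===== SOURCE A (Python) =====
-- def find_end_iter(start, count):
--     """
--     iteratively finds and returns the last value in
--     the sequence that begins with start and ends after count steps.
--     :param start: start value
--     :param count: how many steps
--     :return:
--     """
--     while True:
--         if count <1:
--             break
--         start=(start*2)+5
--         count-=1
--     return start
--
-- def find_start_itr(goal,count):
--     """
--     iteratively searches forward from an initial value
--     of 0, and returns the smallest integer value that reaches or exceeds the goal.
--     :param goal: the number is wanted to be exceed
--     :param count: how many steps in the sequence
--     :return: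
--     """
--     if goal < 0:
--         pass
--     elif count < 1:
--         pass
--     else:
--         start=0
--         while True:
--
--             x=find_end_iter(start,count)
--             if x>=goal:
--                 break
--             start=start+1
--         return start
-- ===== SOURCE B (Python) =====
-- def find_start_itr(goal, count):
--     # Closed form: after count doubling-and-add-5 steps, start s ends at
--     # s*2^count + 5*(2^count - 1); the smallest s >= 0 reaching goal is
--     # ceil((goal - 5*(2^count - 1)) / 2^count), clamped to 0.
--     if goal < 0 or count < 1:
--         return None
--     m = 1 << count
--     need = goal - 5 * (m - 1)
--     return max(0, -(-need // m))
-- ===== Notes on version B (the rewrite author's own statement) =====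
-- stated objective: faster
-- what changed: replaces the linear search over start values (each probed by an O(count) iteration) with a closed-form ceiling-division formula max(0, ceil((goal-5(2^count-1))/2^count))
import Mathlib
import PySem

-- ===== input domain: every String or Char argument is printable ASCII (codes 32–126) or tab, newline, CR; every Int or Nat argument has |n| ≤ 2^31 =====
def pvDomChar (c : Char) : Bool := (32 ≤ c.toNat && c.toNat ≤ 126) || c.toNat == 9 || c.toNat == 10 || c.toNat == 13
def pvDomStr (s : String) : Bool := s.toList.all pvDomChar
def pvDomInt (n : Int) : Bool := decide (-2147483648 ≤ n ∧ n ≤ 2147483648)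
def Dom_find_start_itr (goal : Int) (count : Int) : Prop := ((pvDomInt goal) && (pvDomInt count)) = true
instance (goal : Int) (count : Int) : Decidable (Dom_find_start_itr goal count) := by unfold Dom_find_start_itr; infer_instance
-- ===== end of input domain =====

-- B replaces A's linear search over start values (each probed by an O(count) loop)
-- with one closed-form ceiling division; equivalence of return values is proved below.

-- ===== PORT A =====
-- while True: if count<1: break; start=start*2+5; count-=1; return start
def find_end_iter (start : Int) (count : Int) : Int :=
  if count < 1 then start else find_end_iter (start * 2 + 5) (count - 1)
termination_by count.toNat
decreasing_by omega

-- termination fact for A's search loop: from start ≥ 0 the probed end value never drops below start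
theorem pv_fe_ge (count : Int) (s : Int) (hs : 0 ≤ s) : s ≤ find_end_iter s count := by
  by_cases h : count < 1
  · rw [find_end_iter]; simp [h]
  · rw [find_end_iter]; simp only [h, if_false]
    have := pv_fe_ge (count - 1) (s * 2 + 5) (by omega)
    omega
termination_by count.toNat
decreasing_by omega

-- A's inner while loop: start=0; while True: x=find_end_iter(start,count); if x>=goal: break; start+=1
def pvLoopA (goal : Int) (count : Int) (start : Int) (h : 0 ≤ start) : Int :=
  if find_end_iter start count ≥ goal then start
  else pvLoopA goal count (start + 1) (by omega)
termination_by (goal - start).toNat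
decreasing_by
  have := pv_fe_ge count start h
  omega

def find_start_itr (goal : Int) (count : Int) : Option Int :=
  if goal < 0 then none
  else if count < 1 then none
  else some (pvLoopA goal count 0 (le_refl 0))

-- ===== PORT B =====
def find_start_itr_alt (goal : Int) (count : Int) : Option Int :=
  if goal < 0 || count < 1 then none
  else
    let m : Int := 2 ^ count.toNat        -- 1 << count
    let need : Int := goal - 5 * (m - 1)
    some (max 0 (-(PySem.Int.floordiv (-need) m)))   -- max(0, -(-need // m))

-- ===== PRECONDITION & SPEC =====
def Spec_find_start_itr (goal : Int) (count : Int) (out : Option Int) : Prop := out = find_start_itr_alt goal count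
instance (goal : Int) (count : Int) (out : Option Int) : Decidable (Spec_find_start_itr goal count out) := by unfold Spec_find_start_itr; infer_instance

-- ===== CLAIM (what is proved, stated in full; the proofs are below) =====
def Claim_equal_find_start_itr : Prop := ∀ (goal : Int) (count : Int), Dom_find_start_itr goal count → Spec_find_start_itr goal count (find_start_itr goal count)

-- ===== LEMMAS AND PROOFS =====

-- closed form of find_end_iter for a Nat number of steps
theorem pv_fe_closed_nat (n : Nat) : ∀ s : Int, find_end_iter s (n : Int) = s * 2 ^ n + 5 * (2 ^ n - 1) := by
  induction n with
  | zero => intro s; rw [find_end_iter]; norm_num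
  | succ k ih =>
    intro s
    rw [find_end_iter]
    have h1 : ¬ ((k + 1 : Nat) : Int) < 1 := by push_cast; omega
    simp only [h1, if_false]
    have h2 : ((k + 1 : Nat) : Int) - 1 = (k : Int) := by push_cast; ring
    rw [h2, ih]
    ring

theorem pv_fe_closed (count : Int) (hc : 1 ≤ count) (s : Int) :
    find_end_iter s count = s * 2 ^ count.toNat + 5 * (2 ^ count.toNat - 1) := by
  have := pv_fe_closed_nat count.toNat s
  rwa [Int.toNat_of_nonneg (by omega)] at this

-- the search loop returns t whenever t is in range and characterised by the two bracket facts
theorem pv_loop_eq (goal count M F t : Int) (ht0 : 0 ≤ t)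
    (hfe : ∀ s : Int, find_end_iter s count = s * M + F)
    (hub : goal ≤ t * M + F)
    (hlb : ∀ s : Int, 0 ≤ s → s < t → s * M + F < goal) :
    ∀ (k : Nat) (s : Int) (hs : 0 ≤ s), s ≤ t → (t - s).toNat = k → pvLoopA goal count s hs = t := by
  intro k
  induction k with
  | zero =>
    intro s hs hst hk
    have hst' : s = t := by omega
    rw [pvLoopA]
    subst hst'
    simp [hfe s, hub]
  | succ k ih =>
    intro s hs hst hk
    have hlt : s < t := by omega
    rw [pvLoopA]
    have : ¬ find_end_iter s count ≥ goal := by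
      rw [hfe s]; exact not_le.mpr (hlb s hs hlt)
    simp only [this, if_false]
    exact ih (s + 1) (by omega) (by omega) (by omega)

-- ===== VERDICT (by name: the statement is the Claim_ definition above) =====
theorem find_start_itr_spec : Claim_equal_find_start_itr := by
  unfold Claim_equal_find_start_itr Spec_find_start_itr
  intro goal count _
  by_cases hg : goal < 0
  · simp [find_start_itr, find_start_itr_alt, hg]
  · by_cases hc : count < 1
    · simp [find_start_itr, find_start_itr_alt, hg, hc]
    · have hg' : 0 ≤ goal := by omega
      have hc' : 1 ≤ count := by omega
      set M : Int := 2 ^ count.toNat with hMdef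
      have hM : 0 < M := by positivity
      set F : Int := 5 * (M - 1) with hFdef
      set c : Int := -(PySem.Int.floordiv (-(goal - F)) M) with hcdef
      have hbr : (c - 1) * M < goal - F ∧ goal - F ≤ c * M :=
        (PySem.Int.neg_floordiv_neg_eq_iff_of_pos hM).mp hcdef.symm
      set t : Int := max 0 c with htdef
      have ht0 : 0 ≤ t := le_max_left _ _
      have hub : goal ≤ t * M + F := by
        rcases le_total c 0 with h | h
        · have htz : t = 0 := by omega
          have : c * M ≤ 0 := mul_nonpos_of_nonpos_of_nonneg h (le_of_lt hM)
          rw [htz]; omega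
        · have htc : t = c := by omega
          rw [htc]; omega
      have hlb : ∀ s : Int, 0 ≤ s → s < t → s * M + F < goal := by
        intro s hs hst
        have htc : t = c := by omega
        have hsc : s ≤ c - 1 := by omega
        have : s * M ≤ (c - 1) * M := mul_le_mul_of_nonneg_right hsc (le_of_lt hM)
        omega
      have hfe : ∀ s : Int, find_end_iter s count = s * M + F := fun s => pv_fe_closed count hc' s
      have hloop := pv_loop_eq goal count M F t ht0 hfe hub hlb (t - 0).toNat 0 (le_refl 0) ht0 rfl
      simp only [find_start_itr, find_start_itr_alt, hg, hc, if_false]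
      simp only [← hMdef, ← hFdef, ← hcdef, ← htdef, hloop]
      simp
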